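-- pv_equiv track=rewrite | github.com/rjwalters/nistmemsql | scripts/analyze_sqllogictest_failures.py | analyze_vendor_specific
-- ===== SOURCE A (Python) =====
-- from typing import Dict, List, Tuple
--
-- def analyze_vendor_specific(files: Dict[str, str], patterns: Dict[str, List[str]]) -> Dict[str, Dict[str, int]]:
--     """Analyze vendor-specific test results."""
--     vendor_stats = {}
--
--     for vendor in ["PostgreSQL-specific", "MySQL-specific", "SQLite-specific"]:
--         if vendor not in patterns:
--             continue
--
--         file_list = patterns[vendor]
--         stats = {
--             "total": len(file_list),
--             "passed": sum(1 for f in file_list if files.get(f) == "passed"),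
--             "failed": sum(1 for f in file_list if files.get(f) == "failed"),
--             "untested": sum(1 for f in file_list if files.get(f) == "untested"),
--         }
--         vendor_stats[vendor] = stats
--
--     return vendor_stats
-- ===== SOURCE B (Python) =====
-- def analyze_vendor_specific(files, patterns):
--     """Analyze vendor-specific test results (single tally pass per vendor)."""
--
--     def summarize(file_list):
--         tally = {}
--         for f in file_list:
--             s = files.get(f)
--             tally[s] = tally.get(s, 0) + 1
--         return {
--             "total": len(file_list),
--             "passed": tally.get("passed", 0),
--             "failed": tally.get("failed", 0),
--             "untested": tally.get("untested", 0),
--         }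
--
--     return {
--         vendor: summarize(patterns[vendor])
--         for vendor in ("PostgreSQL-specific", "MySQL-specific", "SQLite-specific")
--         if vendor in patterns
--     }
-- ===== Notes on version B (the rewrite author's own statement) =====
-- stated objective: alternative
-- what changed: Per vendor, B makes one tally pass building a status->count table and reads the three counts from it, replacing A's three separate scans of the file list; the vendor loop becomes a comprehension.
import Mathlib
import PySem

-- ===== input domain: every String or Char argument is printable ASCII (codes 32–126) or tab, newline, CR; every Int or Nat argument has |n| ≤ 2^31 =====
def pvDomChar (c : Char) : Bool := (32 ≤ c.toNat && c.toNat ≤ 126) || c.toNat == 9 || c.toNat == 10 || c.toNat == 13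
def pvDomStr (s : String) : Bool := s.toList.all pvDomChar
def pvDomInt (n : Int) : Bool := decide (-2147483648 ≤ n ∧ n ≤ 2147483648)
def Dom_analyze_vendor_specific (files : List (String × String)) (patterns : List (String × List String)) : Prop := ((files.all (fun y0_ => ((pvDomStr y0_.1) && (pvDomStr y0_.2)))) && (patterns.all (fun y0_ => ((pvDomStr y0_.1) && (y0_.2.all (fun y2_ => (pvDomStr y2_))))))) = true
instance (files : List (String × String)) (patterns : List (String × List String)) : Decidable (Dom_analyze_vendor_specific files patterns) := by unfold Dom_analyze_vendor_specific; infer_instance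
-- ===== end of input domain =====

-- ===== PORT A =====
-- B replaces A's three separate scans per vendor by one tally pass; same return value everywhere.
def pvStatsA (files : List (String × String)) (fl : List String) : List (String × Int) :=
  [("total", (fl.length : Int)),
   ("passed", fl.foldl (fun acc f => if (PySem.Dict.mk files).get? f = some "passed" then acc + 1 else acc) 0),
   ("failed", fl.foldl (fun acc f => if (PySem.Dict.mk files).get? f = some "failed" then acc + 1 else acc) 0),
   ("untested", fl.foldl (fun acc f => if (PySem.Dict.mk files).get? f = some "untested" then acc + 1 else acc) 0)]

def analyze_vendor_specific (files : List (String × String)) (patterns : List (String × List String)) : List (String × List (String × Int)) :=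
  (["PostgreSQL-specific", "MySQL-specific", "SQLite-specific"].foldl
    (fun vs vendor =>
      match (PySem.Dict.mk patterns).get? vendor with
      | none => vs
      | some fl => PySem.Dict.insert vs vendor (pvStatsA files fl))
    PySem.Dict.empty).items

-- ===== PORT B =====
def pvStatsB (files : List (String × String)) (fl : List String) : List (String × Int) :=
  let tally := fl.foldl (fun t f => PySem.Dict.modify t ((PySem.Dict.mk files).get? f) 0 (· + 1)) PySem.Dict.empty
  [("total", (fl.length : Int)),
   ("passed", tally.getD (some "passed") 0),
   ("failed", tally.getD (some "failed") 0),
   ("untested", tally.getD (some "untested") 0)]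

def analyze_vendor_specific_alt (files : List (String × String)) (patterns : List (String × List String)) : List (String × List (String × Int)) :=
  ["PostgreSQL-specific", "MySQL-specific", "SQLite-specific"].filterMap
    (fun vendor => ((PySem.Dict.mk patterns).get? vendor).map (fun fl => (vendor, pvStatsB files fl)))

-- ===== PRECONDITION & SPEC =====
def Spec_analyze_vendor_specific (files : List (String × String)) (patterns : List (String × List String)) (out : List (String × List (String × Int))) : Prop := out = analyze_vendor_specific_alt files patterns
instance (files : List (String × String)) (patterns : List (String × List String)) (out : List (String × List (String × Int))) : Decidable (Spec_analyze_vendor_specific files patterns out) := by unfold Spec_analyze_vendor_specific; infer_instance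

-- ===== CLAIM (what is proved, stated in full; the proofs are below) =====
def Claim_equal_analyze_vendor_specific : Prop := ∀ (files : List (String × String)) (patterns : List (String × List String)), Dom_analyze_vendor_specific files patterns → Spec_analyze_vendor_specific files patterns (analyze_vendor_specific files patterns)

-- ===== LEMMAS AND PROOFS =====

-- loop invariant: A's running count plus the tally's current entry is conserved
theorem pvTally_gen (g : String → Option String) (st : String) :
    ∀ (fl : List String) (d : PySem.Dict (Option String) Int) (a : Int),
      List.foldl (fun acc f => if g f = some st then acc + 1 else acc) a fl
          + PySem.Dict.getD d (some st) 0
        = PySem.Dict.getD (List.foldl (fun t f => PySem.Dict.modify t (g f) 0 (· + 1)) d fl) (some st) 0 + a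
  | [], d, a => by simp [Int.add_comm]
  | f :: fl, d, a => by
      simp only [List.foldl_cons]
      have h := pvTally_gen g st fl (PySem.Dict.modify d (g f) 0 (· + 1))
        (if g f = some st then a + 1 else a)
      have hd : PySem.Dict.getD (PySem.Dict.modify d (g f) 0 (· + 1)) (some st) 0
          = if g f = some st then PySem.Dict.getD d (some st) 0 + 1
            else PySem.Dict.getD d (some st) 0 := by
        rw [PySem.Dict.getD_modify]
        by_cases hc : g f = some st <;> simp [hc, eq_comm]
      rw [hd] at h
      split_ifs at h ⊢ <;> omega

-- one status count of A's scan equals B's tally-table lookup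
theorem pvCount_eq_tally (files : List (String × String)) (fl : List String) (st : String) :
    fl.foldl (fun acc f => if (PySem.Dict.mk files).get? f = some st then acc + 1 else acc) (0 : Int)
      = (fl.foldl (fun t f => PySem.Dict.modify t ((PySem.Dict.mk files).get? f) 0 (· + 1)) PySem.Dict.empty).getD (some st) 0 := by
  have h := pvTally_gen (fun f => (PySem.Dict.mk files).get? f) st fl PySem.Dict.empty 0
  simpa using h

theorem pvStats_eq (files : List (String × String)) (fl : List String) :
    pvStatsA files fl = pvStatsB files fl := by
  unfold pvStatsA pvStatsB
  simp only [pvCount_eq_tally]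

-- ===== VERDICT (by name: the statement is the Claim_ definition above) =====
theorem analyze_vendor_specific_spec : Claim_equal_analyze_vendor_specific := by
  unfold Claim_equal_analyze_vendor_specific Spec_analyze_vendor_specific
  intro files patterns _
  unfold analyze_vendor_specific analyze_vendor_specific_alt
  cases h1 : (PySem.Dict.mk patterns).get? "PostgreSQL-specific" <;>
  cases h2 : (PySem.Dict.mk patterns).get? "MySQL-specific" <;>
  cases h3 : (PySem.Dict.mk patterns).get? "SQLite-specific" <;>
    simp [h1, h2, h3, pvStats_eq, PySem.Dict.insert,
          PySem.Dict.empty, PySem.Dict.contains]
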